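-- pv_equiv track=rewrite | github.com/jagadeshwarrao/programming | kudosandtrees.py | solve
-- ===== SOURCE A (Python) =====
-- MOD = 10**9 + 7
--
-- def solve(a):
-- 	s1 = [0]
-- 	for x in a:
-- 		s1.append((s1[-1] + x) % MOD)
-- 	s2 = [0]
-- 	for i, x in enumerate(a):
-- 		s2.append((s2[-1] + x * s1[i]) % MOD)
-- 	s3 = [0]
-- 	for i, x in enumerate(a):
-- 		s3.append((s3[-1] + x * s2[i]) % MOD)
-- 	return s3[-1]
-- ===== SOURCE B (Python) =====
-- MOD = 10**9 + 7
--
-- def solve(a):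
--     e1 = e2 = e3 = 0
--     for x in a:
--         e3 = (e3 + x * e2) % MOD
--         e2 = (e2 + x * e1) % MOD
--         e1 = (e1 + x) % MOD
--     return e3
-- ===== Notes on version B (the rewrite author's own statement) =====
-- stated objective: faster
-- what changed: Replaces the three sequential prefix-sum lists s1,s2,s3 with a single fused pass over a maintaining three running scalars e1,e2,e3 (updating e3, then e2, then e1 so each reads the previous step's values), returning e3; no lists are allocated.
import Mathlib
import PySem

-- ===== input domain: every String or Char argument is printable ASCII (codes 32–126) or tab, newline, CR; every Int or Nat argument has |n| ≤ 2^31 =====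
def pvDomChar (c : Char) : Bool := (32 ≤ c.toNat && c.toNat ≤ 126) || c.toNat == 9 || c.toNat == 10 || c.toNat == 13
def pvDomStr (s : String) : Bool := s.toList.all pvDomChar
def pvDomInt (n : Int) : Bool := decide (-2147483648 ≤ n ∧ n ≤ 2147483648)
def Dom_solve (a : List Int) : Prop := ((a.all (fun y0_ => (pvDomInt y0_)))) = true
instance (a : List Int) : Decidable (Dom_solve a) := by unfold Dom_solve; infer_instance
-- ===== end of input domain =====

-- B fuses A's three prefix-sum lists into one pass with three running scalars; return values proved equal.

def pvMOD : Int := 1000000007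

-- ===== PORT A =====
-- s1 = [0]; for x in a: s1.append((s1[-1] + x) % MOD)
def solveLoop1 (s : List Int) : List Int → List Int
  | [] => s
  | x :: xs => solveLoop1 (s ++ [PySem.Int.mod (PySem.List.pyGetD s (-1) 0 + x) pvMOD]) xs

-- s2 = [0]; for i, x in enumerate(a): s2.append((s2[-1] + x * s1[i]) % MOD)
def solveLoop2 (s1 : List Int) (i : Int) (s : List Int) : List Int → List Int
  | [] => s
  | x :: xs =>
      solveLoop2 s1 (i + 1)
        (s ++ [PySem.Int.mod (PySem.List.pyGetD s (-1) 0 + x * PySem.List.pyGetD s1 i 0) pvMOD]) xs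

-- s3 = [0]; for i, x in enumerate(a): s3.append((s3[-1] + x * s2[i]) % MOD)
def solveLoop3 (s2 : List Int) (i : Int) (s : List Int) : List Int → List Int
  | [] => s
  | x :: xs =>
      solveLoop3 s2 (i + 1)
        (s ++ [PySem.Int.mod (PySem.List.pyGetD s (-1) 0 + x * PySem.List.pyGetD s2 i 0) pvMOD]) xs

def solve (a : List Int) : Int :=
  let s1 := solveLoop1 [0] a
  let s2 := solveLoop2 s1 0 [0] a
  let s3 := solveLoop3 s2 0 [0] a
  PySem.List.pyGetD s3 (-1) 0

-- ===== PORT B =====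
def solve_alt (a : List Int) : Int :=
  (a.foldl
    (fun (s : Int × Int × Int) x =>
      (PySem.Int.mod (s.1 + x) pvMOD,
       PySem.Int.mod (s.2.1 + x * s.1) pvMOD,
       PySem.Int.mod (s.2.2 + x * s.2.1) pvMOD))
    (0, 0, 0)).2.2

-- ===== PRECONDITION & SPEC =====
def Spec_solve (a : List Int) (out : Int) : Prop := out = solve_alt a
instance (a : List Int) (out : Int) : Decidable (Spec_solve a out) := by unfold Spec_solve; infer_instance

-- ===== CLAIM (what is proved, stated in full; the proofs are below) =====
def Claim_equal_solve : Prop := ∀ (a : List Int), Dom_solve a → Spec_solve a (solve a)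

-- ===== LEMMAS AND PROOFS =====

-- forward characterizations of A's three lists
def scan1 (c1 : Int) : List Int → List Int
  | [] => [c1]
  | x :: xs => c1 :: scan1 (PySem.Int.mod (c1 + x) pvMOD) xs

def scan2 (c1 c2 : Int) : List Int → List Int
  | [] => [c2]
  | x :: xs => c2 :: scan2 (PySem.Int.mod (c1 + x) pvMOD) (PySem.Int.mod (c2 + x * c1) pvMOD) xs

def scan3 (c1 c2 c3 : Int) : List Int → List Int
  | [] => [c3]
  | x :: xs => c3 :: scan3 (PySem.Int.mod (c1 + x) pvMOD) (PySem.Int.mod (c2 + x * c1) pvMOD)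
      (PySem.Int.mod (c3 + x * c2) pvMOD) xs

theorem solveLoop1_eq (xs : List Int) : ∀ (pre : List Int) (c : Int),
    solveLoop1 (pre ++ [c]) xs = pre ++ scan1 c xs := by
  induction xs with
  | nil => intro pre c; simp [solveLoop1, scan1]
  | cons x xs ih =>
    intro pre c
    rw [solveLoop1, PySem.List.pyGetD_neg_one_append_singleton]
    rw [ih (pre ++ [c]) _]
    simp [scan1]

theorem solveLoop2_eq (xs : List Int) : ∀ (pre rest spre : List Int) (c1 c2 : Int),
    solveLoop2 (pre ++ scan1 c1 xs ++ rest) (pre.length : Int) (spre ++ [c2]) xs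
      = spre ++ scan2 c1 c2 xs := by
  induction xs with
  | nil => intro pre rest spre c1 c2; simp [solveLoop2, scan2]
  | cons x xs ih =>
    intro pre rest spre c1 c2
    rw [solveLoop2, PySem.List.pyGetD_neg_one_append_singleton]
    have hidx : PySem.List.pyGetD (pre ++ scan1 c1 (x :: xs) ++ rest) (pre.length : Int) 0 = c1 := by
      rw [scan1, List.append_assoc]
      simp [PySem.List.pyGetD_natCast, List.getD]
    rw [hidx]
    have hshape : pre ++ scan1 c1 (x :: xs) ++ rest
        = (pre ++ [c1]) ++ scan1 (PySem.Int.mod (c1 + x) pvMOD) xs ++ rest := by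
      simp [scan1]
    have hlen : (pre.length : Int) + 1 = (((pre ++ [c1]).length : Nat) : Int) := by
      simp
    rw [hshape, hlen]
    rw [ih (pre ++ [c1]) rest (spre ++ [c2]) _ _]
    simp [scan2]

theorem solveLoop3_eq (xs : List Int) : ∀ (pre rest spre : List Int) (c1 c2 c3 : Int),
    solveLoop3 (pre ++ scan2 c1 c2 xs ++ rest) (pre.length : Int) (spre ++ [c3]) xs
      = spre ++ scan3 c1 c2 c3 xs := by
  induction xs with
  | nil => intro pre rest spre c1 c2 c3; simp [solveLoop3, scan3]
  | cons x xs ih =>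
    intro pre rest spre c1 c2 c3
    rw [solveLoop3, PySem.List.pyGetD_neg_one_append_singleton]
    have hidx : PySem.List.pyGetD (pre ++ scan2 c1 c2 (x :: xs) ++ rest) (pre.length : Int) 0 = c2 := by
      rw [scan2, List.append_assoc]
      simp [PySem.List.pyGetD_natCast, List.getD]
    rw [hidx]
    have hshape : pre ++ scan2 c1 c2 (x :: xs) ++ rest
        = (pre ++ [c2]) ++ scan2 (PySem.Int.mod (c1 + x) pvMOD) (PySem.Int.mod (c2 + x * c1) pvMOD) xs ++ rest := by
      simp [scan2]
    have hlen : (pre.length : Int) + 1 = (((pre ++ [c2]).length : Nat) : Int) := by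
      simp
    rw [hshape, hlen]
    rw [ih (pre ++ [c2]) rest (spre ++ [c3]) _ _ _]
    simp [scan3]

theorem getLast?_cons_of_ne_nil {α : Type} (a : α) (l : List α) (h : l ≠ []) :
    (a :: l).getLast? = l.getLast? := by
  cases l with
  | nil => exact absurd rfl h
  | cons b t => simp

theorem scan3_ne_nil (xs : List Int) (c1 c2 c3 : Int) : scan3 c1 c2 c3 xs ≠ [] := by
  cases xs <;> simp [scan3]

theorem getLast_scan3 (xs : List Int) : ∀ (c1 c2 c3 : Int),
    (scan3 c1 c2 c3 xs).getLast? =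
      some ((xs.foldl
        (fun (s : Int × Int × Int) x =>
          (PySem.Int.mod (s.1 + x) pvMOD,
           PySem.Int.mod (s.2.1 + x * s.1) pvMOD,
           PySem.Int.mod (s.2.2 + x * s.2.1) pvMOD))
        (c1, c2, c3)).2.2) := by
  induction xs with
  | nil => intro c1 c2 c3; simp [scan3]
  | cons x xs ih =>
    intro c1 c2 c3
    rw [scan3, getLast?_cons_of_ne_nil _ _ (scan3_ne_nil xs _ _ _), ih]
    simp [List.foldl]

-- ===== VERDICT (by name: the statement is the Claim_ definition above) =====
theorem solve_spec : Claim_equal_solve := by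
  intro a _
  unfold Spec_solve solve solve_alt
  have h1 : solveLoop1 [0] a = scan1 0 a := by
    simpa using solveLoop1_eq a [] 0
  have h2 : solveLoop2 (scan1 0 a) 0 [0] a = scan2 0 0 a := by
    simpa using solveLoop2_eq a [] [] [] 0 0
  have h3 : solveLoop3 (scan2 0 0 a) 0 [0] a = scan3 0 0 0 a := by
    simpa using solveLoop3_eq a [] [] [] 0 0 0
  simp only [h1, h2, h3]
  rw [show ((-1 : Int)) = (-1 : Int) from rfl]
  have := getLast_scan3 a 0 0 0
  rw [PySem.List.pyGetD, PySem.List.pyGet?_neg_one, this]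
  rfl
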